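-- pv_equiv track=rewrite | github.com/DockeryAI/BuildRunner3 | core/model_switcher.py | _extract_architecture
-- ===== SOURCE A (Python) =====
-- from typing import Dict, List, Any
--
-- def _extract_architecture(spec_content: str) -> Dict[str, str]:
--     """
--     Extract architecture from spec
--
--     Args:
--         spec_content: Full spec content
--
--     Returns:
--         Dict with frontend, backend, database, infrastructure keys
--     """
--     lines = spec_content.split("\n")
--     arch = {
--         "frontend": "",
--         "backend": "",
--         "database": "",
--         "infrastructure": ""
--     }
--
--     in_arch_section = False
--     for line in lines:
--         if "## Architecture" in line or "## Technical Architecture" in line: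
--             in_arch_section = True
--             continue
--         elif in_arch_section and line.startswith("##"):
--             # Exited architecture section
--             break
--         elif in_arch_section and line.strip():
--             # Parse architecture details
--             line_lower = line.lower()
--             if "frontend" in line_lower or "ui" in line_lower:
--                 arch["frontend"] = line.strip()
--             elif "backend" in line_lower or "api" in line_lower:
--                 arch["backend"] = line.strip()
--             elif "database" in line_lower or "db" in line_lower:
--                 arch["database"] = line.strip()
--             elif "infrastructure" in line_lower or "deployment" in line_lower:
--                 arch["infrastructure"] = line.strip()
--
--     return arch
-- ===== SOURCE B (Python) =====
-- def _extract_architecture(spec_content: str):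
--     """Two-phase: isolate the architecture section's lines, then classify them."""
--     lines = spec_content.split("\n")
--     arch = {"frontend": "", "backend": "", "database": "", "infrastructure": ""}
--
--     # Phase 1: find the section header, then take lines up to the next heading.
--     section = []
--     for i, line in enumerate(lines):
--         if "## Architecture" in line or "## Technical Architecture" in line:
--             for later in lines[i + 1:]:
--                 if later.startswith("##"):
--                     break
--                 section.append(later)
--             break
--
--     # Phase 2: classify each non-blank section line; later matches overwrite.
--     for line in section:
--         if not line.strip():
--             continue
--         low = line.lower()
--         text = line.strip()
--         if "frontend" in low or "ui" in low:
--             arch["frontend"] = text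
--         elif "backend" in low or "api" in low:
--             arch["backend"] = text
--         elif "database" in low or "db" in low:
--             arch["database"] = text
--         elif "infrastructure" in low or "deployment" in low:
--             arch["infrastructure"] = text
--     return arch
-- ===== Notes on version B (the rewrite author's own statement) =====
-- stated objective: alternative
-- what changed: A's single stateful scan with an in_arch_section flag is replaced by a two-phase decomposition (locate the header and slice out the section's lines, then classify only those lines); Pre_ excludes specs where more than one line contains an architecture header marker, a degenerate corner on which keeping the section open (A) or closing it at the next heading (B) are both defensible readings.
import Mathlib
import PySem

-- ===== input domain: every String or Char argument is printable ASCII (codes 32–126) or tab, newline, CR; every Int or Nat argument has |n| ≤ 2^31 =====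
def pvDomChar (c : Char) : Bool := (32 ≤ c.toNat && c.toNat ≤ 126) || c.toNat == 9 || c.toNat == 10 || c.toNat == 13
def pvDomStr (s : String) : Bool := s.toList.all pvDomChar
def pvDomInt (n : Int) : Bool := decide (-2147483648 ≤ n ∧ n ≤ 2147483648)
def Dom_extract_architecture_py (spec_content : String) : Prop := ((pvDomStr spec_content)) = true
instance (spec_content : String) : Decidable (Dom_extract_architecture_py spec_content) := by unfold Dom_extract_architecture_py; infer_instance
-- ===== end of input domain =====

-- B replaces A's single stateful scan by a two-phase decomposition (locate & slice the
-- section, then classify only its lines); objective: alternative decomposition.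

-- ===== PORT A =====
-- A's single for-loop with the in_arch_section flag; returning early models 'break'.
def pvLoopA : List String → Bool → PySem.Dict String String → PySem.Dict String String
  | [], _, arch => arch
  | line :: rest, inArch, arch =>
    if PySem.Str.isIn "## Architecture" line || PySem.Str.isIn "## Technical Architecture" line then
      pvLoopA rest true arch
    else if inArch && PySem.Str.startswith line "##" then
      arch
    else if inArch && (PySem.Str.strip line != "") then
      let line_lower := PySem.Str.lower line
      pvLoopA rest inArch
        (if PySem.Str.isIn "frontend" line_lower || PySem.Str.isIn "ui" line_lower then
          arch.insert "frontend" (PySem.Str.strip line)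
        else if PySem.Str.isIn "backend" line_lower || PySem.Str.isIn "api" line_lower then
          arch.insert "backend" (PySem.Str.strip line)
        else if PySem.Str.isIn "database" line_lower || PySem.Str.isIn "db" line_lower then
          arch.insert "database" (PySem.Str.strip line)
        else if PySem.Str.isIn "infrastructure" line_lower || PySem.Str.isIn "deployment" line_lower then
          arch.insert "infrastructure" (PySem.Str.strip line)
        else arch)
    else
      pvLoopA rest inArch arch

def extract_architecture_py (spec_content : String) : List (String × String) :=
  let lines := (PySem.Str.split? spec_content "\n").getD []
  let arch : PySem.Dict String String :=
    PySem.Dict.mk [("frontend", ""), ("backend", ""), ("database", ""), ("infrastructure", "")]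
  (pvLoopA lines false arch).items

-- ===== PORT B =====
def pvIsHeaderB (line : String) : Bool :=
  PySem.Str.isIn "## Architecture" line || PySem.Str.isIn "## Technical Architecture" line

-- Phase 1a: the lines after the first header line (none if there is no header).
def pvTailB : List String → Option (List String)
  | [] => none
  | line :: rest => if pvIsHeaderB line then some rest else pvTailB rest

-- Phase 1b: the section's lines — everything up to the next heading.
def pvSectionB : List String → List String
  | [] => []
  | line :: rest =>
    if PySem.Str.startswith line "##" then []
    else line :: pvSectionB rest

-- Phase 2: classify one section line.
def pvClassifyB (arch : PySem.Dict String String) (line : String) : PySem.Dict String String :=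
  if PySem.Str.strip line == "" then arch
  else
    let low := PySem.Str.lower line
    let text := PySem.Str.strip line
    if PySem.Str.isIn "frontend" low || PySem.Str.isIn "ui" low then arch.insert "frontend" text
    else if PySem.Str.isIn "backend" low || PySem.Str.isIn "api" low then arch.insert "backend" text
    else if PySem.Str.isIn "database" low || PySem.Str.isIn "db" low then arch.insert "database" text
    else if PySem.Str.isIn "infrastructure" low || PySem.Str.isIn "deployment" low then
      arch.insert "infrastructure" text
    else arch

def extract_architecture_py_alt (spec_content : String) : List (String × String) :=
  let lines := (PySem.Str.split? spec_content "\n").getD []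
  let arch : PySem.Dict String String :=
    PySem.Dict.mk [("frontend", ""), ("backend", ""), ("database", ""), ("infrastructure", "")]
  match pvTailB lines with
  | none => arch.items
  | some tail => ((pvSectionB tail).foldl pvClassifyB arch).items

-- ===== PRECONDITION & SPEC =====
-- Pre_ excludes specs where MORE THAN ONE line contains an architecture header marker
-- ('## Architecture' / '## Technical Architecture'): on that degenerate corner A keeps the
-- section open past a repeated header while B closes it at the next heading, and either
-- reading is defensible; with at most one header line the two agree everywhere.
def Pre_extract_architecture_py (spec_content : String) : Prop :=
  (((PySem.Str.split? spec_content "\n").getD []).countP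
    (fun line => PySem.Str.isIn "## Architecture" line
              || PySem.Str.isIn "## Technical Architecture" line)) ≤ 1
instance (spec_content : String) : Decidable (Pre_extract_architecture_py spec_content) := by unfold Pre_extract_architecture_py; infer_instance

def pvWitness_extract_architecture_py : String := "## Architecture\nFrontend: React\nBackend: API"

def Spec_extract_architecture_py (spec_content : String) (out : List (String × String)) : Prop := out = extract_architecture_py_alt spec_content
instance (spec_content : String) (out : List (String × String)) : Decidable (Spec_extract_architecture_py spec_content out) := by unfold Spec_extract_architecture_py; infer_instance

-- ===== CLAIM (what is proved, stated in full; the proofs are below) =====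
def Claim_equal_extract_architecture_py : Prop := ∀ (spec_content : String), Dom_extract_architecture_py spec_content → Pre_extract_architecture_py spec_content → Spec_extract_architecture_py spec_content (extract_architecture_py spec_content)

-- ===== LEMMAS AND PROOFS =====

-- If no remaining line is a header line, A's flagged loop is B's fold over the section.
theorem pvLoopA_true (lines : List String) (hn : lines.countP pvIsHeaderB = 0) :
    ∀ arch, pvLoopA lines true arch = (pvSectionB lines).foldl pvClassifyB arch := by
  induction lines with
  | nil => intro arch; rfl
  | cons line rest ih =>
    intro arch
    have hline : pvIsHeaderB line = false := by
      by_contra h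
      simp [List.countP_cons, h] at hn
    have hrest : rest.countP pvIsHeaderB = 0 := by
      rw [List.countP_cons, hline] at hn; simpa using hn
    simp only [pvLoopA, pvSectionB]
    have hline' := hline
    unfold pvIsHeaderB at hline'
    rw [hline']
    simp only [Bool.false_eq_true, if_false]
    split_ifs with h2 h3 <;> simp_all [pvClassifyB]

-- Before the section, A's loop just searches for the first header line.
theorem pvLoopA_false (lines : List String) :
    ∀ arch, pvLoopA lines false arch =
      match pvTailB lines with
      | none => arch
      | some tail => pvLoopA tail true arch := by
  induction lines with
  | nil => intro arch; rfl
  | cons line rest ih =>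
    intro arch
    simp only [pvLoopA, pvTailB, pvIsHeaderB]
    split_ifs with h1 <;> simp_all

-- The first header line is counted, so a tail after it inherits 'no headers' from Pre_.
theorem pvTailB_count (lines : List String) :
    ∀ tail, pvTailB lines = some tail →
      lines.countP pvIsHeaderB = tail.countP pvIsHeaderB + 1 := by
  induction lines with
  | nil => intro tail h; cases h
  | cons line rest ih =>
    intro tail h
    simp only [pvTailB] at h
    split_ifs at h with h1
    · cases h; simp [h1]
    · simp [h1, ih tail h]

-- ===== VERDICT (by name: the statement is the Claim_ definition above) =====
theorem extract_architecture_py_spec : Claim_equal_extract_architecture_py := by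
  intro spec_content _ hpre
  unfold Pre_extract_architecture_py at hpre
  unfold Spec_extract_architecture_py extract_architecture_py extract_architecture_py_alt
  simp only [pvLoopA_false]
  cases htail : pvTailB ((PySem.Str.split? spec_content "\n").getD []) with
  | none => rfl
  | some tail =>
    have hc := pvTailB_count _ tail htail
    have hz : tail.countP pvIsHeaderB = 0 := by
      have : (((PySem.Str.split? spec_content "\n").getD []).countP pvIsHeaderB) ≤ 1 := by
        convert hpre using 2
      omega
    simp [pvLoopA_true tail hz]
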